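-- pv_equiv track=rewrite | github.com/qingdaoqin/daily_stock_analysis | src/core/trading_calendar.py | _normalize_market_code
-- ===== SOURCE A (Python) =====
-- def _normalize_market_code(code: str) -> str:
--     """Normalize exchange-prefixed/suffixed stock codes for market detection."""
--     normalized = (code or "").strip().upper()
--     if not normalized:
--         return ""
--
--     for suffix in (".SH", ".SZ", ".SS", ".BJ"):
--         if normalized.endswith(suffix):
--             digits = normalized[: -len(suffix)]
--             if digits.isdigit() and len(digits) in (5, 6):
--                 return digits
--
--     for prefix in ("SH", "SZ", "SS", "BJ"):
--         if normalized.startswith(prefix):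
--             digits = normalized[len(prefix):]
--             if digits.isdigit() and len(digits) in (5, 6):
--                 return digits
--
--     return normalized
-- ===== SOURCE B (Python) =====
-- def _normalize_market_code(code: str) -> str:
--     """Normalize exchange-prefixed/suffixed stock codes for market detection."""
--     normalized = (code or "").strip().upper()
--     if not normalized:
--         return ""
--
--     # Parse, don't strip: measure the leading digit run, then check the remainder
--     # is exactly one exchange suffix (suffix form: DIGITS '.' TAG).
--     i = 0
--     while i < len(normalized) and normalized[i].isdigit():
--         i += 1
--     if i in (5, 6) and normalized[i:] in (".SH", ".SZ", ".SS", ".BJ"):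
--         return normalized[:i]
--
--     # Prefix form: a 2-letter tag followed by a digit run reaching the end.
--     if normalized[:2] in ("SH", "SZ", "SS", "BJ"):
--         j = 2
--         while j < len(normalized) and normalized[j].isdigit():
--             j += 1
--         if j == len(normalized) and len(normalized) - 2 in (5, 6):
--             return normalized[2:]
--
--     return normalized
-- ===== Notes on version B (the rewrite author's own statement) =====
-- stated objective: alternative
-- what changed: A strips candidate affixes with endswith/startswith loops and revalidates each remainder with substring isdigit; B instead parses the string character-by-character: an index scan measures the leading digit run (and the digit run after a 2-letter tag) and the remainder is compared against the exchange tags.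
import Mathlib
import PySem

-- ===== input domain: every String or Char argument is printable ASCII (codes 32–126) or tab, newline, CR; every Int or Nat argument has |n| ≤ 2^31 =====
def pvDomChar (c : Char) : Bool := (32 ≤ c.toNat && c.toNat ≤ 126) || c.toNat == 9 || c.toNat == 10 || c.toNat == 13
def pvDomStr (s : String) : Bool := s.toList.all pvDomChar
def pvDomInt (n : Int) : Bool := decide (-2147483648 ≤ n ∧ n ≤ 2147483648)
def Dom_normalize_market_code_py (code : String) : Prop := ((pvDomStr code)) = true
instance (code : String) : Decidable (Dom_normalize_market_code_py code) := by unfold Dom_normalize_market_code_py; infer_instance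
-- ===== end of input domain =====

-- B replaces A's affix-table loops (endswith/startswith + substring isdigit revalidation) by a
-- character-level parse: an index scan measures the digit runs and the remainder is compared
-- against the exchange tags (objective: alternative, same cost).

-- ===== PORT A =====
-- digits.isdigit() and len(digits) in (5, 6)
def pvDigits56 (d : List Char) : Bool :=
  PySem.Chars.strIsdigit d && (d.length == 5 || d.length == 6)

-- one iteration of A's suffix loop body (none = fall through to the next suffix)
def pvTrySuffix (n : List Char) (suf : List Char) : Option (List Char) :=
  if PySem.Chars.endswith n suf then
    let digits := PySem.List.slice n none (some (-((suf.length : Nat) : Int)))  -- normalized[:-len(suffix)]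
    if pvDigits56 digits then some digits else none
  else none

-- one iteration of A's prefix loop body
def pvTryPrefix (n : List Char) (pre : List Char) : Option (List Char) :=
  if PySem.Chars.startswith n pre then
    let digits := PySem.List.slice n (some ((pre.length : Nat) : Int)) none  -- normalized[len(prefix):]
    if pvDigits56 digits then some digits else none
  else none

def normalize_market_code_py (code : String) : String :=
  -- (code or "").strip().upper(): for a str argument, `code or ""` equals `code`
  let normalized := PySem.Chars.upper (PySem.Chars.strip code.toList)
  if normalized = [] then "" else
  match [".SH".toList, ".SZ".toList, ".SS".toList, ".BJ".toList].findSome? (pvTrySuffix normalized) with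
  | some d => String.ofList d
  | none =>
    match ["SH".toList, "SZ".toList, "SS".toList, "BJ".toList].findSome? (pvTryPrefix normalized) with
    | some d => String.ofList d
    | none => String.ofList normalized

-- ===== PORT B =====
-- the `while i < len(..) and ..[i].isdigit(): i += 1` index scan: length of the leading digit run
def pvScanDigits : List Char → Nat
  | [] => 0
  | c :: cs => if PySem.Chars.isdigit c then pvScanDigits cs + 1 else 0

def normalize_market_code_py_alt (code : String) : String :=
  let normalized := PySem.Chars.upper (PySem.Chars.strip code.toList)
  if normalized = [] then "" else
  -- suffix form: DIGITS '.' TAG — leading digit run of length 5/6, remainder exactly a suffix tag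
  let i := pvScanDigits normalized
  if (i = 5 ∨ i = 6) ∧ normalized.drop i ∈ [".SH".toList, ".SZ".toList, ".SS".toList, ".BJ".toList] then
    String.ofList (normalized.take i)
  -- prefix form: a 2-letter tag then a digit run reaching the end
  else if normalized.take 2 ∈ ["SH".toList, "SZ".toList, "SS".toList, "BJ".toList] then
    let j := 2 + pvScanDigits (normalized.drop 2)
    if j = normalized.length ∧ (normalized.length - 2 = 5 ∨ normalized.length - 2 = 6) then
      String.ofList (normalized.drop 2)
    else String.ofList normalized
  else String.ofList normalized

-- ===== PRECONDITION & SPEC =====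
def Spec_normalize_market_code_py (code : String) (out : String) : Prop := out = normalize_market_code_py_alt code
instance (code : String) (out : String) : Decidable (Spec_normalize_market_code_py code out) := by unfold Spec_normalize_market_code_py; infer_instance

-- ===== CLAIM (what is proved, stated in full; the proofs are below) =====
def Claim_equal_normalize_market_code_py : Prop := ∀ (code : String), Dom_normalize_market_code_py code → Spec_normalize_market_code_py code (normalize_market_code_py code)

-- ===== LEMMAS AND PROOFS =====

theorem scan_le (n : List Char) : pvScanDigits n ≤ n.length := by
  induction n with
  | nil => simp [pvScanDigits]
  | cons c cs ih => simp only [pvScanDigits, List.length_cons]; split <;> omega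

theorem scan_eq_len_iff (n : List Char) :
    pvScanDigits n = n.length ↔ ∀ c ∈ n, PySem.Chars.isdigit c = true := by
  induction n with
  | nil => simp [pvScanDigits]
  | cons c cs ih =>
    by_cases hc : PySem.Chars.isdigit c = true
    · rw [show pvScanDigits (c :: cs) = pvScanDigits cs + 1 by simp [pvScanDigits, hc]]
      simp only [List.length_cons, List.mem_cons]
      constructor
      · intro h x hx
        rcases hx with rfl | hx
        · exact hc
        · exact (ih.mp (by omega)) x hx
      · intro h
        have := ih.mpr (fun x hx => h x (Or.inr hx))
        omega
    · rw [show pvScanDigits (c :: cs) = 0 by simp [pvScanDigits, hc]]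
      have := scan_le cs
      simp only [List.length_cons, List.mem_cons]
      constructor
      · intro h; omega
      · intro h; exact absurd (h c (Or.inl rfl)) hc

theorem scan_append (a : List Char) (c : Char) (t : List Char)
    (ha : ∀ x ∈ a, PySem.Chars.isdigit x = true) (hc : PySem.Chars.isdigit c = false) :
    pvScanDigits (a ++ c :: t) = a.length := by
  induction a with
  | nil => simp [pvScanDigits, hc]
  | cons d ds ih =>
    have hd : PySem.Chars.isdigit d = true := ha d (by simp)
    simp [pvScanDigits, hd, ih (fun x hx => ha x (by simp [hx]))]

theorem scan_take (n : List Char) : ∀ c ∈ n.take (pvScanDigits n), PySem.Chars.isdigit c = true := by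
  induction n with
  | nil => simp
  | cons c cs ih =>
    by_cases hc : PySem.Chars.isdigit c = true
    · rw [show pvScanDigits (c :: cs) = pvScanDigits cs + 1 by simp [pvScanDigits, hc],
          List.take_succ_cons]
      intro x hx
      rcases List.mem_cons.mp hx with rfl | hx
      · exact hc
      · exact ih x hx
    · simp [pvScanDigits, hc]

theorem digits56_iff_scan (d : List Char) :
    pvDigits56 d = true ↔ (pvScanDigits d = d.length ∧ (d.length = 5 ∨ d.length = 6)) := by
  unfold pvDigits56
  rw [Bool.and_eq_true]
  constructor
  · rintro ⟨h1, h2⟩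
    refine ⟨?_, by simpa using h2⟩
    rw [scan_eq_len_iff]
    have := (by simpa [PySem.Chars.strIsdigit] using h1 :
      ¬d.isEmpty = true ∧ ∀ c ∈ d, PySem.Chars.isdigit c = true)
    exact this.2
  · rintro ⟨h1, h2⟩
    refine ⟨?_, by simpa using h2⟩
    have hall := (scan_eq_len_iff d).mp h1
    have hne : d ≠ [] := by rcases d with _ | _ <;> simp_all
    simp [PySem.Chars.strIsdigit, hne]
    exact hall

theorem digits56_all {d : List Char} (hd : pvDigits56 d = true) :
    ∀ x ∈ d, PySem.Chars.isdigit x = true :=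
  (scan_eq_len_iff d).mp ((digits56_iff_scan d).mp hd).1

-- A's one suffix-loop step, characterized by B's digit-run scan
theorem trySuffix_scan (n ti : List Char) (hlen : ti.length = 2) :
    pvTrySuffix n ('.' :: ti)
      = if (pvScanDigits n = 5 ∨ pvScanDigits n = 6) ∧ n.drop (pvScanDigits n) = '.' :: ti then
          some (n.take (pvScanDigits n)) else none := by
  unfold pvTrySuffix
  by_cases hend : PySem.Chars.endswith n ('.' :: ti) = true
  · rw [if_pos hend]
    obtain ⟨a, rfl⟩ : ('.' :: ti) <:+ n := (PySem.Chars.endswith_iff n _).mp hend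
    have hL : ('.' :: ti).length = 3 := by simp [hlen]
    have hsl : PySem.List.slice (a ++ '.' :: ti) none (some (-((('.' :: ti).length : Nat) : Int)))
        = a := by
      rw [hL, PySem.List.slice_to_neg_natCast _ 3 (by omega)]
      simp [hlen]
    rw [hsl]
    have hdot : PySem.Chars.isdigit '.' = false := by decide
    by_cases hd : pvDigits56 a = true
    · have hscan : pvScanDigits (a ++ '.' :: ti) = a.length :=
        scan_append a '.' ti (digits56_all hd) hdot
      have hlen56 := ((digits56_iff_scan a).mp hd).2
      rw [if_pos hd, hscan, if_pos ⟨hlen56, by simp⟩]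
      simp
    · rw [if_neg hd]
      by_cases hc : (pvScanDigits (a ++ '.' :: ti) = 5 ∨ pvScanDigits (a ++ '.' :: ti) = 6) ∧
          (a ++ '.' :: ti).drop (pvScanDigits (a ++ '.' :: ti)) = '.' :: ti
      · exfalso
        set m := a ++ '.' :: ti with hm
        obtain ⟨h56, hdr⟩ := hc
        set i := pvScanDigits m with hi
        have hile : i ≤ m.length := scan_le m
        have hlentake : (m.take i).length = i := by rw [List.length_take]; omega
        have hsplit : m.take i ++ '.' :: ti = m := by rw [← hdr]; exact List.take_append_drop i m
        have hlenm : m.length = a.length + 3 := by simp [hm, hL]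
        have hleni : m.length = i + 3 := by
          have := congrArg List.length hsplit
          rw [List.length_append, hlentake, hL] at this
          omega
        have hcat : a ++ '.' :: ti = m.take i ++ '.' :: ti := by rw [hsplit]
        have haeq : a = m.take i := List.append_inj_left hcat (by omega)
        apply hd
        rw [haeq, digits56_iff_scan]
        refine ⟨?_, by omega⟩
        rw [scan_eq_len_iff]
        intro c hcm
        rw [hi] at hcm
        exact scan_take m c hcm
      · rw [if_neg hc]
  · rw [if_neg hend]
    by_cases hc : (pvScanDigits n = 5 ∨ pvScanDigits n = 6) ∧
        n.drop (pvScanDigits n) = '.' :: ti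
    · exfalso
      apply hend
      rw [PySem.Chars.endswith_iff]
      exact ⟨n.take (pvScanDigits n), by rw [← hc.2]; exact List.take_append_drop _ n⟩
    · rw [if_neg hc]

-- A's whole suffix phase equals B's suffix test
theorem suffix_phase (n : List Char) :
    [".SH".toList, ".SZ".toList, ".SS".toList, ".BJ".toList].findSome? (pvTrySuffix n)
      = if (pvScanDigits n = 5 ∨ pvScanDigits n = 6) ∧
            n.drop (pvScanDigits n) ∈ [".SH".toList, ".SZ".toList, ".SS".toList, ".BJ".toList] then
          some (n.take (pvScanDigits n)) else none := by
  have h1 := trySuffix_scan n ['S','H'] rfl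
  have h2 := trySuffix_scan n ['S','Z'] rfl
  have h3 := trySuffix_scan n ['S','S'] rfl
  have h4 := trySuffix_scan n ['B','J'] rfl
  simp only [List.findSome?]
  rw [show (".SH".toList : List Char) = '.' :: ['S','H'] from rfl, h1,
      show (".SZ".toList : List Char) = '.' :: ['S','Z'] from rfl, h2,
      show (".SS".toList : List Char) = '.' :: ['S','S'] from rfl, h3,
      show (".BJ".toList : List Char) = '.' :: ['B','J'] from rfl, h4]
  by_cases h56 : pvScanDigits n = 5 ∨ pvScanDigits n = 6
  · by_cases m1 : n.drop (pvScanDigits n) = '.' :: ['S','H']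
    · simp [h56, m1]
    · by_cases m2 : n.drop (pvScanDigits n) = '.' :: ['S','Z']
      · simp [h56, m2]
      · by_cases m3 : n.drop (pvScanDigits n) = '.' :: ['S','S']
        · simp [h56, m3]
        · by_cases m4 : n.drop (pvScanDigits n) = '.' :: ['B','J']
          · simp [h56, m4]
          · simp [m1, m2, m3, m4]
  · simp [h56]

theorem tryPrefix_eq (n p : List Char) (hlen : p.length = 2) :
    pvTryPrefix n p
      = if n.take 2 = p ∧ pvDigits56 (n.drop 2) then some (n.drop 2) else none := by
  unfold pvTryPrefix
  have hsl : PySem.List.slice n (some ((p.length : Nat) : Int)) none = n.drop 2 := by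
    rw [PySem.List.slice_from_natCast]; rw [hlen]
  by_cases hst : PySem.Chars.startswith n p = true
  · rw [if_pos hst, hsl]
    have htake : n.take 2 = p := by
      obtain ⟨a, rfl⟩ := (PySem.Chars.startswith_iff n p).mp hst
      rw [← hlen]; exact List.take_left
    by_cases hd : pvDigits56 (n.drop 2) = true
    · simp [hd, htake]
    · simp [hd]
  · rw [if_neg hst]
    by_cases htake : n.take 2 = p
    · exfalso
      apply hst
      exact (PySem.Chars.startswith_iff n p).mpr ⟨n.drop 2, by rw [← htake]; simp⟩
    · simp [htake]

theorem prefix_phase (n : List Char) :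
    ["SH".toList, "SZ".toList, "SS".toList, "BJ".toList].findSome? (pvTryPrefix n)
      = if n.take 2 ∈ ["SH".toList, "SZ".toList, "SS".toList, "BJ".toList] then
          (if pvDigits56 (n.drop 2) then some (n.drop 2) else none)
        else none := by
  have h1 := tryPrefix_eq n ['S','H'] rfl
  have h2 := tryPrefix_eq n ['S','Z'] rfl
  have h3 := tryPrefix_eq n ['S','S'] rfl
  have h4 := tryPrefix_eq n ['B','J'] rfl
  simp only [List.findSome?]
  rw [show ("SH".toList : List Char) = ['S','H'] from rfl,
      show ("SZ".toList : List Char) = ['S','Z'] from rfl,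
      show ("SS".toList : List Char) = ['S','S'] from rfl,
      show ("BJ".toList : List Char) = ['B','J'] from rfl, h1, h2, h3, h4]
  by_cases hd : pvDigits56 (n.drop 2) = true
  · by_cases m1 : n.take 2 = ['S','H']
    · simp [m1, hd]
    · by_cases m2 : n.take 2 = ['S','Z']
      · simp [m2, hd]
      · by_cases m3 : n.take 2 = ['S','S']
        · simp [m3, hd]
        · by_cases m4 : n.take 2 = ['B','J']
          · simp [m4, hd]
          · simp [m1, m2, m3, m4]
  · simp [hd]

-- B's inner prefix test equals A's digits check, once take-2 matched a tag
theorem prefix_inner (n : List Char) (h2 : 2 ≤ n.length) :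
    pvDigits56 (n.drop 2) = true
      ↔ (2 + pvScanDigits (n.drop 2) = n.length ∧ (n.length - 2 = 5 ∨ n.length - 2 = 6)) := by
  rw [digits56_iff_scan]
  have hlen : (n.drop 2).length = n.length - 2 := by simp
  rw [hlen]
  omega

theorem take2_len {n : List Char} (hm : n.take 2 ∈ ["SH".toList, "SZ".toList, "SS".toList, "BJ".toList]) :
    2 ≤ n.length := by
  have : (n.take 2).length = 2 := by
    rcases (by simpa using hm : n.take 2 = ['S','H'] ∨ n.take 2 = ['S','Z'] ∨
        n.take 2 = ['S','S'] ∨ n.take 2 = ['B','J']) with h | h | h | h <;> rw [h] <;> rfl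
  simp [List.length_take] at this
  omega

-- ===== VERDICT (by name: the statement is the Claim_ definition above) =====
theorem normalize_market_code_py_spec : Claim_equal_normalize_market_code_py := by
  intro code _
  unfold Spec_normalize_market_code_py normalize_market_code_py normalize_market_code_py_alt
  set n := PySem.Chars.upper (PySem.Chars.strip code.toList) with hn
  clear hn
  by_cases hne : n = []
  · simp [hne]
  · rw [if_neg hne, if_neg hne, suffix_phase]
    by_cases hC : (pvScanDigits n = 5 ∨ pvScanDigits n = 6) ∧
        n.drop (pvScanDigits n) ∈ [".SH".toList, ".SZ".toList, ".SS".toList, ".BJ".toList]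
    · rw [if_pos hC, if_pos hC]
    · rw [if_neg hC, if_neg hC, prefix_phase]
      by_cases hm : n.take 2 ∈ ["SH".toList, "SZ".toList, "SS".toList, "BJ".toList]
      · rw [if_pos hm, if_pos hm]
        have h2 := take2_len hm
        by_cases hd : pvDigits56 (n.drop 2) = true
        · rw [if_pos hd, if_pos ((prefix_inner n h2).mp hd)]
        · rw [if_neg hd, if_neg (fun hc => hd ((prefix_inner n h2).mpr hc))]
      · rw [if_neg hm, if_neg hm]
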